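-- pv_equiv track=rewrite | github.com/sarvagya334/Financial_RAG_personal | src/validators.py | validate_source_usage
-- ===== SOURCE A (Python) =====
-- def validate_source_usage(answer, docs):
--     valid_files = {d["metadata"]["source_file"] for d in docs}
--     for line in answer.splitlines():
--         if "File:" in line:
--             cited = line.split("File:")[-1].strip()
--             if cited not in valid_files:
--                 return False
--     return True
-- ===== SOURCE B (Python) =====
-- def validate_source_usage(answer, docs):
--     valid = sorted({d["metadata"]["source_file"] for d in docs})
--     cited = sorted({line.split("File:")[-1].strip()
--                     for line in answer.splitlines() if "File:" in line})
--     i = j = 0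
--     while i < len(cited):
--         if j == len(valid):
--             return False
--         if valid[j] < cited[i]:
--             j += 1
--         elif valid[j] == cited[i]:
--             i += 1
--         else:
--             return False
--     return True
-- ===== Notes on version B (the rewrite author's own statement) =====
-- stated objective: alternative
-- what changed: Replaces A's hash-set membership test with early return per cited line by sorting both deduplicated name lists and verifying containment with a single two-pointer merge scan over the sorted lists.
import Mathlib
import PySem

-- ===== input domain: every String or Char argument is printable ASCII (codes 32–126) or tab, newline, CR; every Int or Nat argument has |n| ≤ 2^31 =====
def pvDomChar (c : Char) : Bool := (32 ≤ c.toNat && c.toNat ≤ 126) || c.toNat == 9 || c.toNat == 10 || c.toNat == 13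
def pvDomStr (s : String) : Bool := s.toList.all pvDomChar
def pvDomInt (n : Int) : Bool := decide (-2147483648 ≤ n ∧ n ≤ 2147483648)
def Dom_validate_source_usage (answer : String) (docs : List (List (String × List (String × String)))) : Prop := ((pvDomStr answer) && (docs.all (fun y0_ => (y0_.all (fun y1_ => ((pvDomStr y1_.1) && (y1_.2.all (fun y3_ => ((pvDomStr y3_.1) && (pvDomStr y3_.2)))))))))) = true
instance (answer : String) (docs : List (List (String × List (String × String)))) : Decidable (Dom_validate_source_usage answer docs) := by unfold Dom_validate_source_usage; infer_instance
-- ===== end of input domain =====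

-- B sorts the deduplicated cited and valid file-name lists and checks containment by a
-- two-pointer merge scan instead of A's per-line hash-set membership test with early return.
-- ===== PORT A =====
-- both versions extract a citation as line.split("File:")[-1].strip()
def pvExtract (line : String) : String :=
  PySem.Str.strip (((PySem.Str.split? line "File:").getD []).getLastD line)

-- {d["metadata"]["source_file"] for d in docs}  (KeyError excluded by Pre_)
def pvValidFiles (docs : List (List (String × List (String × String)))) : PySem.Set String :=
  PySem.Set.ofList (docs.map (fun d =>
    PySem.Dict.getD (PySem.Dict.mk ((PySem.Dict.mk d).getD "metadata" [])) "source_file" ""))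

-- the for-loop with early 'return False'
def pvLoopA (valid : PySem.Set String) : List String → Bool
  | [] => true
  | line :: rest =>
    if PySem.Str.isIn "File:" line then
      if PySem.Set.contains valid (pvExtract line) then pvLoopA valid rest else false
    else pvLoopA valid rest

def validate_source_usage (answer : String) (docs : List (List (String × List (String × String)))) : Bool :=
  pvLoopA (pvValidFiles docs) (PySem.Str.splitlines answer)

-- ===== PORT B =====
-- the two-pointer while loop over the two sorted lists (indices become list suffixes)
def pvMergeSub : List String → List String → Bool
  | [], _ => true
  | _ :: _, [] => false
  | c :: cs, v :: vs =>
    if v < c then pvMergeSub (c :: cs) vs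
    else if v == c then pvMergeSub cs (v :: vs)
    else false
  termination_by cs vs => cs.length + vs.length

def validate_source_usage_alt (answer : String) (docs : List (List (String × List (String × String)))) : Bool :=
  let valid := PySem.List.sorted (pvValidFiles docs) (fun x => x) false
  let cited := PySem.List.sorted
    (PySem.Set.ofList (((PySem.Str.splitlines answer).filter
      (fun line => PySem.Str.isIn "File:" line)).map pvExtract)) (fun x => x) false
  pvMergeSub cited valid

-- ===== PRECONDITION & SPEC =====
-- Pre_ excludes exactly the inputs where A (and B) raise KeyError: a doc without a
-- "metadata" key or whose metadata dict lacks "source_file".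
def Pre_validate_source_usage (answer : String) (docs : List (List (String × List (String × String)))) : Prop :=
  ∀ d ∈ docs, PySem.Dict.contains (PySem.Dict.mk d) "metadata" = true ∧
    PySem.Dict.contains (PySem.Dict.mk ((PySem.Dict.mk d).getD "metadata" [])) "source_file" = true

instance (answer : String) (docs : List (List (String × List (String × String)))) : Decidable (Pre_validate_source_usage answer docs) := by unfold Pre_validate_source_usage; infer_instance

def pvWitness_validate_source_usage : String × (List (List (String × List (String × String)))) :=
  ("File: x.txt", [[("metadata", [("source_file", "x.txt")])]])

def Spec_validate_source_usage (answer : String) (docs : List (List (String × List (String × String)))) (out : Bool) : Prop := out = validate_source_usage_alt answer docs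
instance (answer : String) (docs : List (List (String × List (String × String)))) (out : Bool) : Decidable (Spec_validate_source_usage answer docs out) := by unfold Spec_validate_source_usage; infer_instance

-- ===== CLAIM (what is proved, stated in full; the proofs are below) =====
def Claim_equal_validate_source_usage : Prop := ∀ (answer : String) (docs : List (List (String × List (String × String)))), Dom_validate_source_usage answer docs → Pre_validate_source_usage answer docs → Spec_validate_source_usage answer docs (validate_source_usage answer docs)

-- ===== LEMMAS AND PROOFS =====
theorem pvLoopA_iff (valid : PySem.Set String) (ls : List String) :
    pvLoopA valid ls = true ↔
      ∀ l ∈ ls, PySem.Str.isIn "File:" l = true → PySem.Set.contains valid (pvExtract l) = true := by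
  induction ls with
  | nil => simp [pvLoopA]
  | cons l rest ih =>
    simp only [pvLoopA, List.mem_cons]
    split_ifs with h hc
    · rw [ih]
      constructor
      · intro hall x hx hIn
        rcases hx with rfl | hx
        · exact hc
        · exact hall x hx hIn
      · intro hall x hx hIn
        exact hall x (Or.inr hx) hIn
    · simp only [false_iff]
      intro hall
      exact hc (hall l (Or.inl rfl) h)
    · rw [ih]
      constructor
      · intro hall x hx hIn
        rcases hx with rfl | hx
        · exact absurd hIn h
        · exact hall x hx hIn
      · intro hall x hx hIn
        exact hall x (Or.inr hx) hIn

-- the merge scan on two strictly increasing lists decides pointwise containment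
theorem pvMergeSub_iff : ∀ (cs vs : List String),
    cs.Pairwise (· < ·) → vs.Pairwise (· < ·) →
    (pvMergeSub cs vs = true ↔ ∀ c ∈ cs, c ∈ vs)
  | [], vs => by simp [pvMergeSub]
  | c :: cs, [] => by
      intro _ _
      refine ⟨fun h => absurd h (by simp [pvMergeSub]), fun h => absurd (h c List.mem_cons_self) (List.not_mem_nil)⟩
  | c :: cs, v :: vs => by
      intro hc hv
      rw [List.pairwise_cons] at hc hv
      by_cases hlt : v < c
      · rw [pvMergeSub, if_pos hlt,
          pvMergeSub_iff (c :: cs) vs (List.pairwise_cons.2 hc) hv.2]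
        constructor
        · intro h x hx
          exact List.mem_cons_of_mem v (h x hx)
        · intro h x hx
          rcases List.mem_cons.1 (h x hx) with rfl | hm
          · rcases List.mem_cons.1 hx with rfl | hm'
            · exact absurd hlt (lt_irrefl _)
            · exact absurd (lt_trans hlt (hc.1 x hm')) (lt_irrefl _)
          · exact hm
      · by_cases heq : v = c
        · subst heq
          rw [pvMergeSub, if_neg hlt, if_pos (by simp),
            pvMergeSub_iff cs (v :: vs) hc.2 (List.pairwise_cons.2 hv)]
          constructor
          · intro h x hx
            rcases List.mem_cons.1 hx with rfl | hm
            · exact List.mem_cons_self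
            · exact h x hm
          · intro h x hx
            exact h x (List.mem_cons_of_mem v hx)
        · rw [pvMergeSub, if_neg hlt, if_neg (by simp only [beq_iff_eq]; exact heq)]
          simp only [Bool.false_eq_true, false_iff]
          intro h
          rcases List.mem_cons.1 (h c List.mem_cons_self) with rfl | hm
          · exact heq rfl
          · have : v < c := hv.1 c hm
            exact hlt this
  termination_by cs vs => cs.length + vs.length

theorem pvAltB_iff (answer : String) (docs : List (List (String × List (String × String)))) :
    validate_source_usage_alt answer docs = true ↔
      ∀ l ∈ PySem.Str.splitlines answer, PySem.Str.isIn "File:" l = true →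
        PySem.Set.contains (pvValidFiles docs) (pvExtract l) = true := by
  simp only [validate_source_usage_alt]
  rw [pvMergeSub_iff _ _ (PySem.List.sorted_ofList_pairwise_lt _)
      (by
        have := PySem.List.sorted_ofList_pairwise_lt
          (xs := docs.map (fun d =>
            PySem.Dict.getD (PySem.Dict.mk ((PySem.Dict.mk d).getD "metadata" [])) "source_file" ""))
        exact this)]
  constructor
  · intro h l hl hIn
    rw [PySem.Set.contains_iff]
    have hmem : pvExtract l ∈ PySem.List.sorted
        (PySem.Set.ofList (((PySem.Str.splitlines answer).filter
          (fun line => PySem.Str.isIn "File:" line)).map pvExtract)) (fun x => x) false := by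
      rw [PySem.List.mem_sorted, PySem.Set.mem_ofList]
      exact List.mem_map_of_mem (List.mem_filter.2 ⟨hl, hIn⟩)
    have := h _ hmem
    rwa [PySem.List.mem_sorted] at this
  · intro h x hx
    rw [PySem.List.mem_sorted, PySem.Set.mem_ofList] at hx
    obtain ⟨l, hl, rfl⟩ := List.mem_map.1 hx
    obtain ⟨hl1, hl2⟩ := List.mem_filter.1 hl
    have := h l hl1 hl2
    rw [PySem.Set.contains_iff] at this
    rwa [PySem.List.mem_sorted]

-- ===== VERDICT (by name: the statement is the Claim_ definition above) =====
theorem validate_source_usage_spec : Claim_equal_validate_source_usage := by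
  intro answer docs _ _
  unfold Spec_validate_source_usage
  rw [Bool.eq_iff_iff]
  unfold validate_source_usage
  rw [pvLoopA_iff, pvAltB_iff]
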